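-- pv_equiv track=rewrite | github.com/anselmo228/CodingTest | programmers/389479.py | solution
-- ===== SOURCE A (Python) =====
-- def solution(players, m, k):
--
--     servers = []
--     result = 0
--
--     def getServers(servers):
--         cnt = 0
--         for i in range(len(servers)):
--             servers[i] += 1
--             if servers[i] < k:
--                 cnt += 1
--         return cnt
--
--     for player in players:
--         n = getServers(servers)  # 서버 갯수
--         need = player // m  # 필요한 서버 갯수
--
--         if need > n and player >= m:
--             for _ in range(need - n):
--                 servers.append(0)
--                 result += 1
--
--     return result
-- ===== SOURCE B (Python) =====
-- def solution(players, m, k):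
--     # Incremental simulation: keep a FIFO of (expiry_hour, count) per spawn
--     # and a running count of active servers, instead of rescanning every server.
--     q = []          # (hour at which these servers stop counting, how many)
--     n = 0           # servers currently counted as active
--     result = 0
--     for i, player in enumerate(players):
--         while q and q[0][0] <= i:
--             n -= q.pop(0)[1]
--         need = player // m
--         if need > n and player >= m:
--             add = need - n
--             q.append((i + k, add))
--             n = need
--             result += add
--     return result
-- ===== Notes on version B (the rewrite author's own statement) =====
-- stated objective: faster
-- what changed: B replaces the per-hour rescan of every individual server (which also keeps dead servers in the list forever) with a running active-server count and a FIFO of (expiry hour, count) aggregates, popping expired batches incrementally.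
import Mathlib
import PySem

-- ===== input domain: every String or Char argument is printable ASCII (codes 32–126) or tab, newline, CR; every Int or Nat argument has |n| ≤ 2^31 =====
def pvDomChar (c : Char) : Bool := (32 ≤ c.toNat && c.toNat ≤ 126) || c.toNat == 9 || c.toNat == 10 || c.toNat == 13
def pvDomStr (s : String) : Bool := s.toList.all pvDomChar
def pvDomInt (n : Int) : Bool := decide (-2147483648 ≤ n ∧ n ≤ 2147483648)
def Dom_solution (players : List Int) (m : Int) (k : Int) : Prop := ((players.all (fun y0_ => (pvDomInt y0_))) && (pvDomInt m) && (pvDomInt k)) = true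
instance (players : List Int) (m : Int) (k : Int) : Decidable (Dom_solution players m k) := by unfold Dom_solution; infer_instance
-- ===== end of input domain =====

-- B replaces A's per-hour rescan of every individual server with a running
-- active count plus a FIFO of (expiry hour, count) aggregates (objective: faster).

-- ===== PORT A =====
-- getServers: increments each server's age in place and counts those with age < k
def pvGetServers (k : Int) : List Int → List Int × Int
  | [] => ([], 0)
  | s :: t =>
    let s' := s + 1
    let (t', c) := pvGetServers k t
    (s' :: t', (if s' < k then 1 else 0) + c)

def pvAGo (m k : Int) : List Int → List Int → Int → Int
  | [], _, result => result
  | p :: rest, servers, result =>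
    let (servers', n) := pvGetServers k servers
    let need := PySem.Int.floordiv p m
    if need > n ∧ p ≥ m then
      pvAGo m k rest (servers' ++ List.replicate (need - n).toNat 0) (result + (need - n))
    else
      pvAGo m k rest servers' result

def solution (players : List Int) (m : Int) (k : Int) : Int :=
  pvAGo m k players [] 0

-- ===== PORT B =====
-- while q and q[0][0] <= i: n -= q.pop(0)[1]
def pvPopExpired (i : Int) : List (Int × Int) → Int → List (Int × Int) × Int
  | [], n => ([], n)
  | (e, c) :: t, n => if e ≤ i then pvPopExpired i t (n - c) else ((e, c) :: t, n)

def pvAltGo (m k : Int) : List Int → Int → List (Int × Int) → Int → Int → Int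
  | [], _, _, _, result => result
  | p :: rest, i, q, n, result =>
    let (q', n') := pvPopExpired i q n
    let need := PySem.Int.floordiv p m
    if need > n' ∧ p ≥ m then
      pvAltGo m k rest (i + 1) (q' ++ [(i + k, need - n')]) need (result + (need - n'))
    else
      pvAltGo m k rest (i + 1) q' n' result

def solution_alt (players : List Int) (m : Int) (k : Int) : Int :=
  pvAltGo m k players 0 [] 0 0

-- ===== PRECONDITION & SPEC =====
-- A raises ZeroDivisionError at 'player // m' when m = 0 and there is a player; only those inputs are excluded.
def Pre_solution (players : List Int) (m : Int) (k : Int) : Prop := players = [] ∨ m ≠ 0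
instance (players : List Int) (m : Int) (k : Int) : Decidable (Pre_solution players m k) := by unfold Pre_solution; infer_instance
def pvWitness_solution : List Int × Int × Int := ([3, 0, 7], 2, 2)

def Spec_solution (players : List Int) (m : Int) (k : Int) (out : Int) : Prop := out = solution_alt players m k
instance (players : List Int) (m : Int) (k : Int) (out : Int) : Decidable (Spec_solution players m k out) := by unfold Spec_solution; infer_instance

-- ===== CLAIM (what is proved, stated in full; the proofs are below) =====
def Claim_equal_solution : Prop := ∀ (players : List Int) (m : Int) (k : Int), Dom_solution players m k → Pre_solution players m k → Spec_solution players m k (solution players m k)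

-- ===== LEMMAS AND PROOFS =====

-- abstract state: hs is the spawn history, entries (expiry hour, batch size)
def pvServers (i k : Int) (hs : List (Int × Int)) : List Int :=
  hs.flatMap (fun p => List.replicate p.2.toNat (i - 1 - p.1 + k))

def pvQ (i k : Int) (hs : List (Int × Int)) : List (Int × Int) :=
  hs.filter (fun p => decide (i - 1 < p.1) || decide (p.1 = i - 1 + k))

def pvN (i k : Int) (hs : List (Int × Int)) : Int :=
  ((pvQ i k hs).map Prod.snd).sum

lemma getServers_append (k : Int) (xs ys : List Int) :
    pvGetServers k (xs ++ ys) =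
      ((pvGetServers k xs).1 ++ (pvGetServers k ys).1,
       (pvGetServers k xs).2 + (pvGetServers k ys).2) := by
  induction xs with
  | nil => simp [pvGetServers]
  | cons x t ih => simp [pvGetServers, ih]; ring

lemma getServers_replicate (k a : Int) (n : Nat) :
    pvGetServers k (List.replicate n a) =
      (List.replicate n (a + 1), if a + 1 < k then (n : Int) else 0) := by
  induction n with
  | zero => simp [pvGetServers]
  | succ n ih =>
    simp only [List.replicate_succ, pvGetServers, ih]
    by_cases h : a + 1 < k <;> simp [h] <;> push_cast <;> ring

lemma getServers_servers (i k : Int) (hs : List (Int × Int))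
    (hpos : ∀ p ∈ hs, 0 < p.2) :
    pvGetServers k (pvServers i k hs) =
      (pvServers (i + 1) k hs,
       ((hs.filter (fun p => decide (i < p.1))).map Prod.snd).sum) := by
  induction hs with
  | nil => simp [pvServers, pvGetServers]
  | cons p t ih =>
    have hp : 0 < p.2 := hpos p (by simp)
    have ht : ∀ q ∈ t, 0 < q.2 := fun q hq => hpos q (by simp [hq])
    have hage : i - 1 - p.1 + k + 1 = i - p.1 + k := by ring
    have hiff : (i - p.1 + k < k) ↔ (i < p.1) := by omega
    simp only [pvServers, List.flatMap_cons] at *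
    rw [getServers_append, getServers_replicate, ih ht]
    have hcast : ((p.2.toNat : Int)) = p.2 := Int.toNat_of_nonneg (le_of_lt hp)
    by_cases hc : i < p.1
    · have h2 : i - p.1 + k < k := by omega
      simp [hage, h2, hc, hcast, List.filter_cons]
    · have : ¬ (i - p.1 + k < k) := by omega
      simp [hage, this, hc, List.filter_cons]

lemma popExpired_sorted (i : Int) (l : List (Int × Int)) (n : Int)
    (hpw : l.Pairwise (fun a b => a.1 < b.1)) :
    pvPopExpired i l n =
      (l.filter (fun p => decide (i < p.1)),
       n - ((l.filter (fun p => decide (p.1 ≤ i))).map Prod.snd).sum) := by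
  induction l generalizing n with
  | nil => simp [pvPopExpired]
  | cons p t ih =>
    obtain ⟨e, c⟩ := p
    have hpw' := (List.pairwise_cons.mp hpw).2
    have hall := (List.pairwise_cons.mp hpw).1
    by_cases he : e ≤ i
    · have : ¬ (i < e) := by omega
      simp only [pvPopExpired, if_pos he]
      rw [ih (n - c) hpw']
      simp [List.filter_cons, this, he]
      ring_nf
    · have hi : i < e := by omega
      have h1 : t.filter (fun p => decide (i < p.1)) = t :=
        List.filter_eq_self.mpr (fun q hq => by
          have := hall q hq; simp at this ⊢; omega)
      have h2 : t.filter (fun p => decide (p.1 ≤ i)) = [] :=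
        List.filter_eq_nil_iff.mpr (fun q hq => by
          have := hall q hq; simp at this ⊢; omega)
      simp [pvPopExpired, he, List.filter_cons, hi, h1, h2]

lemma sum_split (i : Int) (l : List (Int × Int)) :
    ((l.filter (fun p => decide (p.1 ≤ i))).map Prod.snd).sum
      + ((l.filter (fun p => decide (i < p.1))).map Prod.snd).sum
      = (l.map Prod.snd).sum := by
  induction l with
  | nil => simp
  | cons p t ih =>
    by_cases h : p.1 ≤ i
    · have : ¬ (i < p.1) := by omega
      simp [List.filter_cons, h, this, ← ih]; ring
    · have : i < p.1 := by omega
      simp [List.filter_cons, h, this, ← ih]; ring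

-- popped q at hour i = hs filtered to e > i
lemma q_pop (i k : Int) (hs : List (Int × Int)) :
    (pvQ i k hs).filter (fun p => decide (i < p.1)) =
      hs.filter (fun p => decide (i < p.1)) := by
  unfold pvQ
  rw [List.filter_filter]
  apply List.filter_congr
  intro p _
  by_cases h : i < p.1 <;> simp [h] <;> omega

lemma key (m k : Int) : ∀ (rest : List Int) (hs : List (Int × Int)) (i result : Int),
    (hs.map Prod.fst).Pairwise (· < ·) →
    (∀ p ∈ hs, p.1 < i + k) →
    (∀ p ∈ hs, 0 < p.2) →
    pvAGo m k rest (pvServers i k hs) result =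
      pvAltGo m k rest i (pvQ i k hs) (pvN i k hs) result := by
  intro rest
  induction rest with
  | nil => intro hs i result _ _ _; simp [pvAGo, pvAltGo]
  | cons p rest ih =>
    intro hs i result hpw hub hpos
    have hpwq : (pvQ i k hs).Pairwise (fun a b => a.1 < b.1) := by
      unfold pvQ
      exact (List.pairwise_map.mp hpw).sublist List.filter_sublist
    -- A side count
    have hG := getServers_servers i k hs hpos
    -- B side pop
    have hP := popExpired_sorted i (pvQ i k hs) (pvN i k hs) hpwq
    have hq' : (pvQ i k hs).filter (fun p => decide (i < p.1)) =
        hs.filter (fun p => decide (i < p.1)) := q_pop i k hs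
    have hn' : pvN i k hs - (((pvQ i k hs).filter (fun p => decide (p.1 ≤ i))).map Prod.snd).sum
        = ((hs.filter (fun p => decide (i < p.1))).map Prod.snd).sum := by
      have := sum_split i (pvQ i k hs)
      rw [hq'] at this
      unfold pvN; omega
    set n' : Int := ((hs.filter (fun p => decide (i < p.1))).map Prod.snd).sum with hn'def
    simp only [pvAGo, pvAltGo, hG, hP, hq', hn']
    set need := PySem.Int.floordiv p m with hneed
    -- common facts for the next state
    have hsub : ∀ q ∈ hs.filter (fun p => decide (i < p.1)), q ∈ hs :=
      fun q hq => List.mem_of_mem_filter hq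
    by_cases hbr : need > n' ∧ p ≥ m
    · rw [if_pos hbr, if_pos hbr]
      set c := need - n' with hc
      set hs' := hs ++ [(i + k, c)] with hs'def
      have hserv : pvServers (i + 1) k hs ++ List.replicate c.toNat 0 = pvServers (i + 1) k hs' := by
        simp [pvServers, hs'def]
      have hfilter_ub : hs.filter (fun p => decide (p.1 = i + k)) = [] :=
        List.filter_eq_nil_iff.mpr (fun q hq => by
          have := hub q hq; simp; omega)
      have hqnext : pvQ (i + 1) k hs' = hs.filter (fun p => decide (i < p.1)) ++ [(i + k, c)] := by
        unfold pvQ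
        rw [hs'def, List.filter_append]
        congr 1
        · apply List.filter_congr
          intro q hq
          have := hub q hq
          by_cases h : i < q.1 <;> simp [h] <;> omega
        · simp
      have hnnext : pvN (i + 1) k hs' = need := by
        unfold pvN
        rw [hqnext]
        simp; omega
      have hpw' : (hs'.map Prod.fst).Pairwise (· < ·) := by
        rw [hs'def]
        simp only [List.map_append]
        rw [List.pairwise_append]
        refine ⟨hpw, by simp, ?_⟩
        intro a ha b hb
        simp at hb; subst hb
        simp only [List.mem_map] at ha
        obtain ⟨q, hq, rfl⟩ := ha
        exact hub q hq
      have hub' : ∀ q ∈ hs', q.1 < (i + 1) + k := by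
        intro q hq
        rw [hs'def] at hq
        rcases List.mem_append.mp hq with h | h
        · have := hub q h; omega
        · simp at h; subst h; simp
      have hpos' : ∀ q ∈ hs', 0 < q.2 := by
        intro q hq
        rcases List.mem_append.mp hq with h | h
        · exact hpos q h
        · simp at h; subst h; simp; omega
      rw [hserv, ih hs' (i + 1) (result + c) hpw' hub' hpos']
      rw [hqnext, hnnext]
    · rw [if_neg hbr, if_neg hbr]
      have hqnext : pvQ (i + 1) k hs = hs.filter (fun p => decide (i < p.1)) := by
        unfold pvQ
        apply List.filter_congr
        intro q hq
        have := hub q hq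
        by_cases h : i < q.1 <;> simp [h] <;> omega
      have hnnext : pvN (i + 1) k hs = n' := by
        unfold pvN; rw [hqnext]
      have hpw2 : (hs.map Prod.fst).Pairwise (· < ·) := hpw
      have hub2 : ∀ q ∈ hs, q.1 < (i + 1) + k := fun q hq => by have := hub q hq; omega
      rw [ih hs (i + 1) result hpw2 hub2 hpos, hqnext, hnnext]

-- ===== VERDICT (by name: the statement is the Claim_ definition above) =====
theorem solution_spec : Claim_equal_solution := by
  intro players m k _ _
  unfold Spec_solution solution solution_alt
  have h := key m k players [] 0 0 (by simp) (by simp) (by simp)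
  simpa [pvServers, pvQ, pvN] using h
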